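-- pv_equiv track=rewrite | github.com/pcrespan/sign_language_translation | preprocessing/variance.py | fill_frame_gaps
-- ===== SOURCE A (Python) =====
-- def fill_frame_gaps(frame_list, total_frames, max_gap_size=5):
--     if not frame_list:
--         return []
--
--     frame_list = sorted(set(frame_list))
--     filled = []
--
--     for i in range(len(frame_list) - 1):
--         current = frame_list[i]
--         next_frame = frame_list[i + 1]
--         filled.append(current)
--
--         gap = next_frame - current
--         if 1 < gap <= max_gap_size:
--             filled.extend(range(current + 1, next_frame))
--
--     filled.append(frame_list[-1])
--
--     start_block = []
--     for i in range(len(filled)):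
--         if i == 0 or filled[i] == filled[i - 1] + 1:
--             start_block.append(filled[i])
--         else:
--             break
--     if start_block and start_block[0] > 0:
--         start_block = list(range(0, start_block[-1] + 1))
--
--     end_block = []
--     for i in range(len(filled) - 1, -1, -1):
--         if i == len(filled) - 1 or filled[i] == filled[i + 1] - 1:
--             end_block.insert(0, filled[i])
--         else:
--             break
--     if end_block:
--         end_block = list(range(end_block[0], total_frames))
--
--     final_frames = sorted(set(start_block + filled + end_block))
--     return final_frames
-- ===== SOURCE B (Python) =====
-- def fill_frame_gaps(frame_list, total_frames, max_gap_size=5):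
--     frames = sorted(set(frame_list))
--     if not frames:
--         return []
--     # partition into segments: split where the jump is a real gap too wide to fill
--     segments = []
--     cur = [frames[0]]
--     for f in frames[1:]:
--         if f - cur[-1] > 1 and f - cur[-1] > max_gap_size:
--             segments.append(cur)
--             cur = [f]
--         else:
--             cur.append(f)
--     segments.append(cur)
--
--     result = set()
--     for seg in segments:
--         result.update(range(seg[0], seg[-1] + 1))
--     first = segments[0]
--     if first[0] > 0:
--         result.update(range(0, first[0]))
--     last = segments[-1]
--     result.update(range(last[0], total_frames))
--     return sorted(result)
-- ===== Notes on version B (the rewrite author's own statement) =====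
-- stated objective: simpler
-- what changed: B sorts/dedups once, partitions the frames into segments wherever the jump exceeds both 1 and max_gap_size, and builds the result as a set union of each segment's full range plus the range-to-0 prefix and range-to-total_frames suffix, replacing A's fill-then-rescan pipeline (gap-filling loop plus two boundary-scanning break loops, the backward one rebuilding its block with quadratic list.insert(0, ...)).
import Mathlib
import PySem

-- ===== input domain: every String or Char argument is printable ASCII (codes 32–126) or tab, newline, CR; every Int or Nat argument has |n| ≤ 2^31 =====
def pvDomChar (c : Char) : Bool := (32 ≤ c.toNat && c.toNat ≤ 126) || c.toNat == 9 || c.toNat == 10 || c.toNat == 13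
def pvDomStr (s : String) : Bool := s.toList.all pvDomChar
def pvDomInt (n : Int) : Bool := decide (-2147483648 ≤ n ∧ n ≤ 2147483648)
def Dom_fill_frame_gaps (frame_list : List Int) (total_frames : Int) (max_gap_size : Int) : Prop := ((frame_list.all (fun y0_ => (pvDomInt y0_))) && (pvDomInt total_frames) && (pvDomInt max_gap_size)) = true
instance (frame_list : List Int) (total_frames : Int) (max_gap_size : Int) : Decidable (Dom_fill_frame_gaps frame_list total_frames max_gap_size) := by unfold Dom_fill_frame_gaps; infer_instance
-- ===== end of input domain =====

-- B replaces A's fill-then-rescan pipeline (one gap-filling pass plus two boundary-scanning loops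
-- over 'filled') by a single partition of the sorted frames into segments, unioning each segment's
-- full range into a set (objective: simpler decomposition; equivalence is on the return value).

-- ===== PORT A =====
-- the gap-filling loop: for each adjacent pair append current and, if 1 < gap <= max_gap_size,
-- extend with range(current+1, next); finally append the last frame
def pvFillLoop (m : Int) : List Int → List Int
  | [] => []
  | [x] => [x]
  | x :: y :: t =>
      x :: ((if 1 < y - x ∧ y - x ≤ m then PySem.List.pyRange (x + 1) y 1 else []) ++ pvFillLoop m (y :: t))

-- the start-block scan with break (prev = previously appended element)
def pvStartGo (prev : Int) : List Int → List Int
  | [] => []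
  | x :: t => if x = prev + 1 then x :: pvStartGo x t else []

def pvStartBlock : List Int → List Int
  | [] => []
  | x :: t => x :: pvStartGo x t

-- if start_block and start_block[0] > 0: start_block = list(range(0, start_block[-1] + 1))
def pvStartExt : List Int → List Int
  | [] => []
  | x :: t => if 0 < x then PySem.List.pyRange 0 (t.getLastD x + 1) 1 else x :: t

-- the backwards end-block scan with break, building by insert(0, ·): processed on the reversed list
def pvEndGo (next : Int) : List Int → List Int
  | [] => []
  | x :: t => if x = next - 1 then pvEndGo x t ++ [x] else []

def pvEndBlock (filled : List Int) : List Int :=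
  match filled.reverse with
  | [] => []
  | x :: t => pvEndGo x t ++ [x]

-- if end_block: end_block = list(range(end_block[0], total_frames))
def pvEndExt (total_frames : Int) : List Int → List Int
  | [] => []
  | x :: _ => PySem.List.pyRange x total_frames 1

def fill_frame_gaps (frame_list : List Int) (total_frames : Int) (max_gap_size : Int) : List Int :=
  if frame_list = [] then []
  else
    let g := PySem.List.sorted (PySem.Set.ofList frame_list) (fun x => x) false
    let filled := pvFillLoop max_gap_size g
    let start_block := pvStartExt (pvStartBlock filled)
    let end_block := pvEndExt total_frames (pvEndBlock filled)
    PySem.List.sorted (PySem.Set.ofList (start_block ++ filled ++ end_block)) (fun x => x) false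

-- ===== PORT B =====
-- partition the sorted frames into segments, splitting where the jump is > 1 and > max_gap_size
def pvSegGo (m : Int) (cur : List Int) : List Int → List (List Int)
  | [] => [cur]
  | f :: rest =>
      if 1 < f - cur.getLastD 0 ∧ m < f - cur.getLastD 0 then
        cur :: pvSegGo m [f] rest
      else
        pvSegGo m (cur ++ [f]) rest

-- range(seg[0], seg[-1] + 1)
def pvSegRange (s : List Int) : List Int :=
  PySem.List.pyRange (s.headD 0) (s.getLastD 0 + 1) 1

def fill_frame_gaps_alt (frame_list : List Int) (total_frames : Int) (max_gap_size : Int) : List Int :=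
  match PySem.List.sorted (PySem.Set.ofList frame_list) (fun x => x) false with
  | [] => []
  | f0 :: rest =>
      let segs := pvSegGo max_gap_size [f0] rest
      let r1 := segs.foldl (fun r s => PySem.Set.update r (pvSegRange s)) PySem.Set.empty
      let first := segs.headD []
      let r2 := if 0 < first.headD 0 then PySem.Set.update r1 (PySem.List.pyRange 0 (first.headD 0) 1) else r1
      let r3 := PySem.Set.update r2 (PySem.List.pyRange ((segs.getLastD []).headD 0) total_frames 1)
      PySem.List.sorted r3 (fun x => x) false

-- ===== PRECONDITION & SPEC =====
def Spec_fill_frame_gaps (frame_list : List Int) (total_frames : Int) (max_gap_size : Int) (out : List Int) : Prop := out = fill_frame_gaps_alt frame_list total_frames max_gap_size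
instance (frame_list : List Int) (total_frames : Int) (max_gap_size : Int) (out : List Int) : Decidable (Spec_fill_frame_gaps frame_list total_frames max_gap_size out) := by unfold Spec_fill_frame_gaps; infer_instance

-- ===== CLAIM (what is proved, stated in full; the proofs are below) =====
def Claim_equal_fill_frame_gaps : Prop := ∀ (frame_list : List Int) (total_frames : Int) (max_gap_size : Int), Dom_fill_frame_gaps frame_list total_frames max_gap_size → Spec_fill_frame_gaps frame_list total_frames max_gap_size (fill_frame_gaps frame_list total_frames max_gap_size)

-- ===== LEMMAS AND PROOFS =====

-- proof-side recursive description of the segments pvSegGo computes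
def pvSegsF (m : Int) (x : Int) : List Int → List (List Int)
  | [] => [[x]]
  | y :: t =>
      if 1 < y - x ∧ m < y - x then [x] :: pvSegsF m y t
      else
        match pvSegsF m y t with
        | [] => [[x]]
        | s :: ss => (x :: s) :: ss

theorem pvGetLastD_congr {α : Type} (l : List α) (h : l ≠ []) (d d' : α) :
    l.getLastD d = l.getLastD d' := by
  cases l with
  | nil => exact absurd rfl h
  | cons a t =>
    cases hl : (a :: t).getLast? with
    | none => simp at hl
    | some z => simp [List.getLastD_eq_getLast?, hl]

theorem pvRange_last (a b d : Int) (h : a ≤ b) :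
    (PySem.List.pyRange a (b + 1) 1).getLastD d = b := by
  rw [PySem.List.pyRange_one_succ_right h]; exact List.getLastD_concat

theorem pvRange_cons (a b : Int) (h : a ≤ b) :
    PySem.List.pyRange a (b + 1) 1 = a :: PySem.List.pyRange (a + 1) (b + 1) 1 := by
  exact PySem.List.pyRange_one_cons (by omega)

theorem pvSegsF_shape (m x : Int) (xs : List Int) :
    ∃ r ss, pvSegsF m x xs = (x :: r) :: ss := by
  induction xs generalizing x with
  | nil => exact ⟨[], [], rfl⟩
  | cons y t ih =>
    simp only [pvSegsF]
    split
    · exact ⟨[], pvSegsF m y t, rfl⟩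
    · obtain ⟨r, ss, h⟩ := ih y
      rw [h]
      exact ⟨y :: r, ss, rfl⟩

theorem pvSegGo_eq_segsF (m : Int) (xs : List Int) : ∀ (p : List Int) (x : Int),
    pvSegGo m (p ++ [x]) xs =
      match pvSegsF m x xs with
      | [] => []
      | s :: ss => (p ++ s) :: ss := by
  induction xs with
  | nil => intro p x; simp [pvSegGo, pvSegsF]
  | cons f rest ih =>
    intro p x
    simp only [pvSegGo, pvSegsF, List.getLastD_concat]
    split
    · obtain ⟨r, ss, h⟩ := pvSegsF_shape m f rest
      have h1 := ih [] f
      rw [h] at h1 ⊢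
      simp only [List.nil_append] at h1
      rw [h1]
    · obtain ⟨r, ss, h⟩ := pvSegsF_shape m f rest
      have h1 := ih (p ++ [x]) f
      rw [h] at h1 ⊢
      rw [h1]
      simp

theorem pvSegGo_singleton (m x : Int) (xs : List Int) :
    pvSegGo m [x] xs = pvSegsF m x xs := by
  have h := pvSegGo_eq_segsF m xs [] x
  obtain ⟨r, ss, hs⟩ := pvSegsF_shape m x xs
  rw [hs] at h ⊢
  simpa using h

-- every segment is nonempty with head ≤ last
theorem pvSegsF_segs (m x : Int) (xs : List Int) (hc : (x :: xs).Pairwise (· < ·)) :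
    ∀ s ∈ pvSegsF m x xs, ∃ h t, s = h :: t ∧ h ≤ s.getLastD 0 := by
  induction xs generalizing x with
  | nil =>
    intro s hs
    simp only [pvSegsF, List.mem_singleton] at hs
    exact ⟨x, [], by simp [hs], by simp [hs]⟩
  | cons y t ih =>
    intro s hs
    have hc' : (y :: t).Pairwise (· < ·) := hc.tail
    have hxy : x < y := (List.pairwise_cons.1 hc).1 y (by simp)
    simp only [pvSegsF] at hs
    split at hs
    · rcases List.mem_cons.1 hs with h1 | h1
      · exact ⟨x, [], by simp [h1], by simp [h1]⟩
      · exact ih y hc' s h1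
    · obtain ⟨r, ss, hsh⟩ := pvSegsF_shape m y t
      rw [hsh] at hs
      rcases List.mem_cons.1 hs with h1 | h1
      · obtain ⟨h', t', he, hle⟩ := ih y hc' (y :: r) (by rw [hsh]; simp)
        have he' : y = h' := by injection he
        subst he'
        refine ⟨x, y :: r, h1, ?_⟩
        rw [h1, List.getLastD_cons, pvGetLastD_congr (y :: r) (by simp) x 0]
        omega
      · exact ih y hc' s (by rw [hsh]; exact List.mem_cons_of_mem _ h1)

-- consecutive segments are separated by a jump of at least 2
theorem pvSegsF_chain (m x : Int) (xs : List Int) (hc : (x :: xs).Pairwise (· < ·)) :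
    (pvSegsF m x xs).IsChain (fun s t => s.getLastD 0 + 1 < t.headD 0) := by
  induction xs generalizing x with
  | nil => simp [pvSegsF]
  | cons y t ih =>
    have hc' : (y :: t).Pairwise (· < ·) := hc.tail
    have hxy : x < y := (List.pairwise_cons.1 hc).1 y (by simp)
    simp only [pvSegsF]
    split
    · obtain ⟨r, ss, hsh⟩ := pvSegsF_shape m y t
      rw [hsh]
      rw [List.isChain_cons_cons]
      constructor
      · simp; omega
      · rw [← hsh]; exact ih y hc'
    · obtain ⟨r, ss, hsh⟩ := pvSegsF_shape m y t
      rw [hsh]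
      have hch := ih y hc'
      rw [hsh] at hch
      cases ss with
      | nil => simp
      | cons s2 ss2 =>
        rw [List.isChain_cons_cons] at hch ⊢
        refine ⟨?_, hch.2⟩
        rw [List.getLastD_cons, pvGetLastD_congr (y :: r) (by simp) x 0]
        exact hch.1

-- the filled list is exactly the concatenation of the segments' full ranges
theorem pvFillLoop_eq_flatMap (m x : Int) (xs : List Int) (hc : (x :: xs).Pairwise (· < ·)) :
    pvFillLoop m (x :: xs) = (pvSegsF m x xs).flatMap pvSegRange := by
  induction xs generalizing x with
  | nil =>
    simp [pvFillLoop, pvSegsF, pvSegRange, PySem.List.pyRange_one_singleton]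
  | cons y t ih =>
    have hc' : (y :: t).Pairwise (· < ·) := hc.tail
    have hxy : x < y := (List.pairwise_cons.1 hc).1 y (by simp)
    simp only [pvFillLoop, pvSegsF]
    by_cases hsplit : 1 < y - x ∧ m < y - x
    · rw [if_pos hsplit, if_neg (by omega)]
      rw [List.flatMap_cons, ih y hc']
      simp [pvSegRange, PySem.List.pyRange_one_singleton]
    · rw [if_neg hsplit]
      obtain ⟨r, ss, hsh⟩ := pvSegsF_shape m y t
      rw [hsh, List.flatMap_cons]
      have hfill := ih y hc'
      rw [hsh, List.flatMap_cons] at hfill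
      obtain ⟨h', t', he, hle⟩ := pvSegsF_segs m y t hc' (y :: r) (by rw [hsh]; simp)
      have hyL : y ≤ (y :: r).getLastD 0 := by cases he; exact hle
      set L := (y :: r).getLastD 0 with hL
      have hsr1 : pvSegRange (y :: r) = PySem.List.pyRange y (L + 1) 1 := by
        simp [pvSegRange, hL]
      have hLr : L = r.getLastD y := by rw [hL, List.getLastD_cons]
      have hsr2 : pvSegRange (x :: y :: r) = PySem.List.pyRange x (L + 1) 1 := by
        simp only [pvSegRange, List.headD_cons, List.getLastD_cons]
        rw [hLr]
      rw [hsr2, hfill, hsr1]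
      by_cases hgap : 1 < y - x
      · have hle' : y - x ≤ m := by omega
        rw [if_pos ⟨hgap, hle'⟩]
        rw [PySem.List.pyRange_one_append x y (L + 1) (by omega) (by omega)]
        rw [PySem.List.pyRange_one_cons (by omega : x < y)]
        simp
      · have hy1 : y = x + 1 := by omega
        rw [if_neg (by omega)]
        rw [PySem.List.pyRange_one_cons (by omega : x < L + 1)]
        rw [hy1]
        simp

-- the start-block scan consumes exactly a maximal contiguous range
theorem pvStartGo_range (n : Nat) : ∀ (a b : Int) (r : List Int),
    (b + 1 - a).toNat = n → a ≤ b + 1 → (r = [] ∨ b + 1 < r.headD 0) →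
    pvStartGo (a - 1) (PySem.List.pyRange a (b + 1) 1 ++ r) = PySem.List.pyRange a (b + 1) 1 := by
  induction n with
  | zero =>
    intro a b r hn hab hr
    have hba : b + 1 ≤ a := by omega
    rw [PySem.List.pyRange_one_eq_nil hba]
    cases r with
    | nil => simp [pvStartGo]
    | cons h t =>
      rcases hr with hr | hr
      · simp at hr
      · simp only [List.headD_cons] at hr
        simp only [List.nil_append, pvStartGo]
        rw [if_neg (by omega)]
  | succ n ih =>
    intro a b r hn hab hr
    have hab' : a < b + 1 := by omega
    rw [PySem.List.pyRange_one_cons hab']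
    simp only [List.cons_append, pvStartGo]
    rw [if_pos (by omega)]
    have h1 := ih (a + 1) b r (by omega) (by omega) hr
    rw [show a + 1 - 1 = a by omega] at h1
    rw [h1]

theorem pvStartBlock_range (a b : Int) (r : List Int) (hab : a ≤ b)
    (hr : r = [] ∨ b + 1 < r.headD 0) :
    pvStartBlock (PySem.List.pyRange a (b + 1) 1 ++ r) = PySem.List.pyRange a (b + 1) 1 := by
  rw [pvRange_cons a b hab]
  simp only [List.cons_append, pvStartBlock]
  have h1 := pvStartGo_range (b + 1 - (a + 1)).toNat (a + 1) b r rfl (by omega) hr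
  rw [show a + 1 - 1 = a by omega] at h1
  rw [h1]

-- the end-block scan consumes exactly a maximal contiguous range (on the reversed list)
theorem pvEndGo_range (n : Nat) : ∀ (c d : Int) (q : List Int),
    (d - c).toNat = n → c ≤ d → (q = [] ∨ q.headD 0 < c - 1) →
    pvEndGo d ((PySem.List.pyRange c d 1).reverse ++ q) = PySem.List.pyRange c d 1 := by
  induction n with
  | zero =>
    intro c d q hn hcd hq
    have hdc : d ≤ c := by omega
    rw [PySem.List.pyRange_one_eq_nil hdc]
    cases q with
    | nil => simp [pvEndGo]
    | cons h t =>
      rcases hq with hq | hq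
      · simp at hq
      · simp only [List.headD_cons] at hq
        simp only [List.reverse_nil, List.nil_append, pvEndGo]
        rw [if_neg (by omega)]
  | succ n ih =>
    intro c d q hn hcd hq
    have hcd' : c < d := by omega
    have hsp : PySem.List.pyRange c d 1 = PySem.List.pyRange c (d - 1) 1 ++ [d - 1] := by
      conv_lhs => rw [show d = (d - 1) + 1 by omega]
      exact PySem.List.pyRange_one_succ_right (by omega)
    rw [hsp]
    simp only [List.reverse_append, List.reverse_cons, List.reverse_nil, List.nil_append,
      List.cons_append, pvEndGo]
    rw [if_pos trivial]
    rw [ih c (d - 1) q (by omega) (by omega) hq]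

theorem pvEndBlock_range (c d : Int) (q : List Int) (hcd : c ≤ d)
    (hq : q = [] ∨ q.getLastD 0 < c - 1) :
    pvEndBlock (q ++ PySem.List.pyRange c (d + 1) 1) = PySem.List.pyRange c (d + 1) 1 := by
  have hsp : PySem.List.pyRange c (d + 1) 1 = PySem.List.pyRange c d 1 ++ [d] :=
    PySem.List.pyRange_one_succ_right hcd
  have hq' : q.reverse = [] ∨ (q.reverse).headD 0 < c - 1 := by
    rcases hq with hq | hq
    · left; simp [hq]
    · right
      have : q.reverse.headD 0 = q.getLastD 0 := by
        rw [List.headD_eq_head?, List.head?_reverse, ← List.getLastD_eq_getLast?]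
      omega
  rw [hsp]
  simp only [pvEndBlock, List.reverse_append, List.reverse_cons, List.reverse_nil,
    List.nil_append, List.cons_append]
  rw [pvEndGo_range (d - c).toNat c d q.reverse rfl hcd hq']

-- membership and nodup for B's fold of range-unions
theorem pvMemFold (L : List (List Int)) : ∀ (r : PySem.Set Int) (z : Int),
    (z ∈ L.foldl (fun r s => PySem.Set.update r (pvSegRange s)) r) ↔
      z ∈ r ∨ ∃ s ∈ L, z ∈ pvSegRange s := by
  induction L with
  | nil => intro r z; simp
  | cons s L ih =>
    intro r z
    rw [List.foldl_cons, ih, PySem.Set.mem_update]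
    simp only [List.mem_cons]
    constructor
    · rintro ((h | h) | ⟨s', hs', hz⟩)
      · exact Or.inl h
      · exact Or.inr ⟨s, Or.inl rfl, h⟩
      · exact Or.inr ⟨s', Or.inr hs', hz⟩
    · rintro (h | ⟨s', (rfl | hs'), hz⟩)
      · exact Or.inl (Or.inl h)
      · exact Or.inl (Or.inr hz)
      · exact Or.inr ⟨s', hs', hz⟩

theorem pvNodupFold (L : List (List Int)) : ∀ (r : PySem.Set Int), r.Nodup →
    (L.foldl (fun r s => PySem.Set.update r (pvSegRange s)) r).Nodup := by
  induction L with
  | nil => intro r h; exact h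
  | cons s L ih =>
    intro r h
    exact ih _ (PySem.Set.nodup_update r (pvSegRange s) h)

theorem pvGetLastD_append {α : Type} (l r : List α) (d : α) (h : r ≠ []) :
    (l ++ r).getLastD d = r.getLastD d := by
  induction l generalizing d with
  | nil => rfl
  | cons a t ih =>
    rw [List.cons_append, List.getLastD_cons, ih a,
      pvGetLastD_congr r h a d]

-- ===== VERDICT (by name: the statement is the Claim_ definition above) =====
theorem fill_frame_gaps_spec : Claim_equal_fill_frame_gaps := by
  intro fl tf m _
  show fill_frame_gaps fl tf m = fill_frame_gaps_alt fl tf m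
  by_cases hfl : fl = []
  · subst hfl; rfl
  · rcases hgc : PySem.List.sorted (PySem.Set.ofList fl) (fun x => x) false with _ | ⟨f0, rest⟩
    · exfalso
      rw [PySem.List.sorted_eq_nil_iff] at hgc
      obtain ⟨a, ha⟩ : ∃ a, a ∈ fl := by
        cases fl with
        | nil => exact absurd rfl hfl
        | cons a t => exact ⟨a, by simp⟩
      have hmem : a ∈ PySem.Set.ofList fl := (PySem.Set.mem_ofList fl a).2 ha
      rw [hgc] at hmem
      simp at hmem
    · have hch : (f0 :: rest).Pairwise (· < ·) := by
        rw [← hgc]; exact PySem.List.sorted_ofList_pairwise_lt fl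
      obtain ⟨r0, ss, hshape⟩ := pvSegsF_shape m f0 rest
      have hsegs := pvSegsF_segs m f0 rest hch
      have hchain := pvSegsF_chain m f0 rest hch
      have hfill : pvFillLoop m (f0 :: rest) = (pvSegsF m f0 rest).flatMap pvSegRange :=
        pvFillLoop_eq_flatMap m f0 rest hch
      -- first segment: head f0, last b0
      have hf0b0 : f0 ≤ r0.getLastD f0 := by
        obtain ⟨h', t', he, hle⟩ := hsegs (f0 :: r0) (by rw [hshape]; simp)
        have he' : f0 = h' := by injection he
        simp only [List.getLastD_cons] at hle
        omega
      have hseg0 : pvSegRange (f0 :: r0) = PySem.List.pyRange f0 (r0.getLastD f0 + 1) 1 := by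
        simp only [pvSegRange, List.headD_cons, List.getLastD_cons]
      -- last segment: S = S' ++ [hl :: tl]
      obtain ⟨S', sl, hScat⟩ :
          ∃ S' sl, pvSegsF m f0 rest = S' ++ [sl] := by
        rcases List.eq_nil_or_concat (pvSegsF m f0 rest) with h | ⟨S', sl, h⟩
        · rw [hshape] at h; simp at h
        · exact ⟨S', sl, by simpa using h⟩
      obtain ⟨hl, tl, hsl, hld⟩ := hsegs sl (by rw [hScat]; simp)
      subst hsl
      simp only [List.getLastD_cons] at hld
      -- A's start block
      have hstart_raw : pvStartBlock (pvFillLoop m (f0 :: rest)) =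
          PySem.List.pyRange f0 (r0.getLastD f0 + 1) 1 := by
        rw [hfill, hshape, List.flatMap_cons, hseg0]
        apply pvStartBlock_range f0 (r0.getLastD f0) _ hf0b0
        cases hss : ss with
        | nil => left; simp
        | cons s1 ss' =>
          right
          obtain ⟨h1, t1, he1, hle1⟩ := hsegs s1 (by rw [hshape, hss]; simp)
          subst he1
          simp only [List.getLastD_cons] at hle1
          have hsr : pvSegRange (h1 :: t1) = PySem.List.pyRange h1 (t1.getLastD h1 + 1) 1 := by
            simp only [pvSegRange, List.headD_cons, List.getLastD_cons]
          rw [List.flatMap_cons, hsr, pvRange_cons h1 _ hle1]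
          simp only [List.cons_append, List.headD_cons]
          have hch2 := hchain
          rw [hshape, hss, List.isChain_cons_cons] at hch2
          have h3 := hch2.1
          simp only [List.getLastD_cons, List.headD_cons] at h3
          omega
      have hsb : pvStartExt (PySem.List.pyRange f0 (r0.getLastD f0 + 1) 1) =
          if 0 < f0 then PySem.List.pyRange 0 (r0.getLastD f0 + 1) 1
          else PySem.List.pyRange f0 (r0.getLastD f0 + 1) 1 := by
        rw [pvRange_cons f0 _ hf0b0]
        simp only [pvStartExt]
        by_cases h0 : 0 < f0
        · rw [if_pos h0, if_pos h0]
          congr 2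
          rcases lt_or_eq_of_le hf0b0 with hlt | heq
          · rw [pvRange_last (f0 + 1) (r0.getLastD f0) f0 (by omega)]
          · rw [← heq, PySem.List.pyRange_one_eq_nil (by omega), List.getLastD_nil]
        · rw [if_neg h0, if_neg h0, ← pvRange_cons f0 _ hf0b0]
      -- A's end block
      have hsegl : pvSegRange (hl :: tl) = PySem.List.pyRange hl (tl.getLastD hl + 1) 1 := by
        simp only [pvSegRange, List.headD_cons, List.getLastD_cons]
      have hend_raw : pvEndBlock (pvFillLoop m (f0 :: rest)) =
          PySem.List.pyRange hl (tl.getLastD hl + 1) 1 := by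
        rw [hfill, hScat, List.flatMap_append, List.flatMap_cons, List.flatMap_nil,
          List.append_nil, hsegl]
        apply pvEndBlock_range hl (tl.getLastD hl) _ hld
        rcases List.eq_nil_or_concat S' with rfl | ⟨S'', sp, hcc⟩
        · left; simp
        · rw [List.concat_eq_append] at hcc
          subst hcc
          right
          obtain ⟨hp, tp, hep, hlep⟩ := hsegs sp (by rw [hScat]; simp)
          subst hep
          simp only [List.getLastD_cons] at hlep
          have hsrp : pvSegRange (hp :: tp) = PySem.List.pyRange hp (tp.getLastD hp + 1) 1 := by
            simp only [pvSegRange, List.headD_cons, List.getLastD_cons]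
          rw [List.flatMap_append, List.flatMap_cons, List.flatMap_nil, List.append_nil, hsrp]
          rw [pvGetLastD_append _ _ _ (by rw [pvRange_cons hp _ hlep]; simp)]
          rw [pvRange_last hp (tp.getLastD hp) 0 hlep]
          have hch2 := hchain
          rw [hScat, List.isChain_append] at hch2
          have h3 := hch2.2.2 (hp :: tp) (by simp) (hl :: tl) rfl
          simp only [List.getLastD_cons, List.headD_cons] at h3
          omega
      have heb : pvEndExt tf (PySem.List.pyRange hl (tl.getLastD hl + 1) 1) =
          PySem.List.pyRange hl tf 1 := by
        rw [pvRange_cons hl _ hld]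
        simp [pvEndExt]
      -- reduce both programs
      have ha : fill_frame_gaps fl tf m =
          PySem.List.sorted (PySem.Set.ofList
            ((if 0 < f0 then PySem.List.pyRange 0 (r0.getLastD f0 + 1) 1
              else PySem.List.pyRange f0 (r0.getLastD f0 + 1) 1) ++
             (pvSegsF m f0 rest).flatMap pvSegRange ++
             PySem.List.pyRange hl tf 1)) (fun x => x) false := by
        simp only [fill_frame_gaps, if_neg hfl]
        rw [hgc, hstart_raw, hsb, hend_raw, heb, hfill]
      have hb : fill_frame_gaps_alt fl tf m =
          PySem.List.sorted
            (PySem.Set.update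
              (if 0 < f0 then
                PySem.Set.update
                  ((pvSegsF m f0 rest).foldl
                    (fun r s => PySem.Set.update r (pvSegRange s)) PySem.Set.empty)
                  (PySem.List.pyRange 0 f0 1)
               else
                ((pvSegsF m f0 rest).foldl
                    (fun r s => PySem.Set.update r (pvSegRange s)) PySem.Set.empty))
              (PySem.List.pyRange hl tf 1)) (fun x => x) false := by
        simp only [fill_frame_gaps_alt]
        rw [hgc]
        simp only [pvSegGo_singleton]
        have h1 : (pvSegsF m f0 rest).headD [] = f0 :: r0 := by rw [hshape]; rfl
        have h2 : (pvSegsF m f0 rest).getLastD [] = hl :: tl := by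
          rw [hScat, List.getLastD_concat]
        rw [h1, h2]
        simp only [List.headD_cons]
      rw [ha, hb]
      -- both are sorts of nodup lists with the same members
      apply PySem.List.sorted_eq_sorted_of_perm _ _ (fun x => x) (fun _ _ h => h)
      rw [List.perm_ext_iff_of_nodup (PySem.Set.nodup_ofList _) ?nodup]
      case nodup =>
        apply PySem.Set.nodup_update
        split
        · exact PySem.Set.nodup_update _ _ (pvNodupFold _ _ List.nodup_nil)
        · exact pvNodupFold _ _ List.nodup_nil
      intro z
      rw [PySem.Set.mem_ofList]
      simp only [List.mem_append, List.mem_flatMap]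
      have hzF : (f0 ≤ z ∧ z < r0.getLastD f0 + 1) → ∃ s ∈ pvSegsF m f0 rest, z ∈ pvSegRange s := by
        intro h
        refine ⟨f0 :: r0, by rw [hshape]; simp, ?_⟩
        rw [hseg0, PySem.List.mem_pyRange_one]
        exact h
      by_cases h0 : 0 < f0
      · rw [if_pos h0, if_pos h0]
        simp only [PySem.Set.mem_update, pvMemFold, PySem.List.mem_pyRange_one,
          PySem.Set.empty, List.not_mem_nil, false_or]
        constructor
        · rintro ((h | ⟨s, hs, hz⟩) | h)
          · by_cases hlt : z < f0
            · exact Or.inl (Or.inr ⟨by omega, by omega⟩)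
            · exact Or.inl (Or.inl (hzF ⟨by omega, by omega⟩))
          · exact Or.inl (Or.inl ⟨s, hs, hz⟩)
          · exact Or.inr h
        · rintro ((⟨s, hs, hz⟩ | h) | h)
          · exact Or.inl (Or.inr ⟨s, hs, hz⟩)
          · exact Or.inl (Or.inl ⟨h.1, by omega⟩)
          · exact Or.inr h
      · rw [if_neg h0, if_neg h0]
        simp only [PySem.Set.mem_update, pvMemFold, PySem.List.mem_pyRange_one,
          PySem.Set.empty, List.not_mem_nil, false_or]
        constructor
        · rintro ((h | ⟨s, hs, hz⟩) | h)
          · exact Or.inl (hzF h)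
          · exact Or.inl ⟨s, hs, hz⟩
          · exact Or.inr h
        · rintro (⟨s, hs, hz⟩ | h)
          · exact Or.inl (Or.inr ⟨s, hs, hz⟩)
          · exact Or.inr h
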